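-- pv_equiv track=rewrite | github.com/NicoDemaria/CollegePython | Unit04/ejerciciosComplejos.py | validarDesc
-- ===== SOURCE A (Python) =====
-- def validarDesc(descripcion):
--     valido = False
--     palabras = 0
--     mayusSeguidas = False
--     anterior = ''
--     if len(descripcion) <= 60:
--         for car in descripcion:
--             if car == ' ' or car == '.':
--                 palabras += 1
--             else:
--                 if car >= 'A' and car <= 'Z' and anterior >= 'A' and anterior <= 'Z':
--                     mayusSeguidas = True
--
--             anterior = car
--         if palabras <= 3:
--             if mayusSeguidas == False:
--                 valido = True
--     return valido
-- ===== SOURCE B (Python) =====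
-- def validarDesc(descripcion):
--     if len(descripcion) > 60:
--         return False
--     ups = [i for i, c in enumerate(descripcion) if 'A' <= c <= 'Z']
--     if any(b - a == 1 for a, b in zip(ups, ups[1:])):
--         return False
--     return len([c for c in descripcion if c == ' ' or c == '.']) <= 3
-- ===== Notes on version B (the rewrite author's own statement) =====
-- stated objective: alternative
-- what changed: Instead of A's single fused scan carrying (count, flag, previous-char) state, B builds the list of positions of uppercase letters and rejects when two positions differ by exactly 1, and counts separators as the length of a filtered list, behind an early length>60 guard.
import Mathlib
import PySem

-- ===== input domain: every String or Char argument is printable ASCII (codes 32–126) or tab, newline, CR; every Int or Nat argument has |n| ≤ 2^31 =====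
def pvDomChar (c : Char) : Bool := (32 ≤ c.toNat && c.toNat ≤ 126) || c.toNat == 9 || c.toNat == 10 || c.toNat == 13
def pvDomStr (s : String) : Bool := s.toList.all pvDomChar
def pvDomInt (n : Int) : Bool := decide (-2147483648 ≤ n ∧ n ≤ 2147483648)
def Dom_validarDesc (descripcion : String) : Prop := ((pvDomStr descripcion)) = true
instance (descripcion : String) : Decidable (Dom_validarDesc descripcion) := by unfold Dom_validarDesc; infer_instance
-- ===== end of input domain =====

-- B validates by a different decomposition: it builds the LIST OF POSITIONS of uppercase letters and tests index adjacency arithmetically, and counts separators as the length of a filtered list; same O(n) cost (alternative, not claimed faster).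


-- ===== PORT A =====
-- character predicate 'A' <= c <= 'Z' (ASCII range test, as both Pythons write it)
def pvIsUp (c : Char) : Bool := decide ('A' ≤ c) && decide (c ≤ 'Z')

-- anterior is Option Char, none = Python's '' (which compares below 'A', hence not uppercase)
def pvPrevUp : Option Char → Bool
  | none => false
  | some p => pvIsUp p

-- Port of A: one fused foldl over the characters with state (palabras, mayusSeguidas, anterior).
def validarDesc (descripcion : String) : Bool :=
  let cs := descripcion.toList
  if cs.length ≤ 60 then
    let st := cs.foldl (fun (st : Int × Bool × Option Char) car =>
      let palabras := st.1
      let mayus := st.2.1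
      let anterior := st.2.2
      if car = ' ' ∨ car = '.' then (palabras + 1, mayus, some car)
      else if pvIsUp car && pvPrevUp anterior then (palabras, true, some car)
      else (palabras, mayus, some car)) ((0 : Int), false, (none : Option Char))
    decide (st.1 ≤ 3) && !st.2.1
  else false

-- ===== PORT B =====
-- Port of B: length guard; uppercase-position list via enumerate+filter (the list
-- comprehension); adjacency test on consecutive positions (difference exactly 1);
-- separator count as the length of a filtered list.
def validarDesc_alt (descripcion : String) : Bool :=
  let cs := descripcion.toList
  if cs.length > 60 then false
  else
    let ups : List Int := ((PySem.List.enumerate cs).filter (fun p => pvIsUp p.2)).map (fun p => p.1)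
    if (ups.zip ups.tail).any (fun p => p.2 - p.1 == 1) then false
    else decide ((cs.filter (fun c => c = ' ' ∨ c = '.')).length ≤ 3)

-- ===== PRECONDITION & SPEC =====
def Spec_validarDesc (descripcion : String) (out : Bool) : Prop := out = validarDesc_alt descripcion
instance (descripcion : String) (out : Bool) : Decidable (Spec_validarDesc descripcion out) := by unfold Spec_validarDesc; infer_instance

-- ===== CLAIM =====
def Claim_equal_validarDesc : Prop := ∀ (descripcion : String), Dom_validarDesc descripcion → Spec_validarDesc descripcion (validarDesc descripcion)

-- ===== LEMMAS AND PROOFS =====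

-- pvBadFrom prev cs: a consecutive-uppercase pair occurs scanning cs with previous char prev
def pvBadFrom : Option Char → List Char → Bool
  | _, [] => false
  | prev, c :: rest => (pvIsUp c && pvPrevUp prev) || pvBadFrom (some c) rest

-- positions (starting at k) of uppercase characters of cs
def pvUpsFrom (k : Int) : List Char → List Int
  | [] => []
  | c :: r => if pvIsUp c then k :: pvUpsFrom (k + 1) r else pvUpsFrom (k + 1) r

-- adjacency test, recursive form
def pvAnyAdj : List Int → Bool
  | a :: b :: r => (b - a == 1) || pvAnyAdj (b :: r)
  | _ => false

theorem pvSepImpNotUp (c : Char) (h : c = ' ' ∨ c = '.') : pvIsUp c = false := by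
  rcases h with h | h <;> subst h <;> decide

-- A's loop invariant
theorem pvLoopInv (cs : List Char) (p : Int) (m : Bool) (prev : Option Char) :
    cs.foldl (fun (st : Int × Bool × Option Char) car =>
      let palabras := st.1
      let mayus := st.2.1
      let anterior := st.2.2
      if car = ' ' ∨ car = '.' then (palabras + 1, mayus, some car)
      else if pvIsUp car && pvPrevUp anterior then (palabras, true, some car)
      else (palabras, mayus, some car)) (p, m, prev)
    = (p + ((cs.filter (fun c => c = ' ' ∨ c = '.')).length : Int),
       m || pvBadFrom prev cs,
       match cs.getLast? with | some c => some c | none => prev) := by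
  induction cs generalizing p m prev with
  | nil => simp [pvBadFrom]
  | cons c rest ih =>
    simp only [List.foldl_cons]
    by_cases hsep : c = ' ' ∨ c = '.'
    · rw [if_pos hsep, ih]
      have hup := pvSepImpNotUp c hsep
      simp only [Prod.mk.injEq]
      refine ⟨?_, ?_, ?_⟩
      · rw [List.filter_cons_of_pos (by simpa using hsep), List.length_cons]
        push_cast; ring
      · simp [pvBadFrom, hup]
      · cases rest with
        | nil => simp
        | cons h t =>
          cases hgl : (h :: t).getLast? with
          | none => simp [List.getLast?_eq_none_iff] at hgl
          | some x => simp [hgl]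
    · rw [if_neg hsep]
      have hfil : (c :: rest).filter (fun c => c = ' ' ∨ c = '.') = rest.filter (fun c => c = ' ' ∨ c = '.') := by
        rw [List.filter_cons_of_neg (by simpa using hsep)]
      by_cases hup : (pvIsUp c && pvPrevUp prev) = true
      · rw [if_pos hup, ih]
        simp only [Prod.mk.injEq]
        refine ⟨?_, ?_, ?_⟩
        · rw [hfil]
        · simp [pvBadFrom, hup]
        · cases rest with
          | nil => simp
          | cons h t =>
            cases hgl : (h :: t).getLast? with
            | none => simp [List.getLast?_eq_none_iff] at hgl
            | some x => simp [hgl]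
      · rw [if_neg hup, ih]
        simp only [Prod.mk.injEq]
        refine ⟨?_, ?_, ?_⟩
        · rw [hfil]
        · simp only [pvBadFrom]
          rw [Bool.eq_false_iff.mpr hup]
          simp
        · cases rest with
          | nil => simp
          | cons h t =>
            cases hgl : (h :: t).getLast? with
            | none => simp [List.getLast?_eq_none_iff] at hgl
            | some x => simp [hgl]

-- enumerate+filter+map computes pvUpsFrom
theorem pvEnumUps (cs : List Char) (k : Int) :
    ((PySem.List.enumerate cs k).filter (fun p => pvIsUp p.2)).map (fun p => p.1) = pvUpsFrom k cs := by
  induction cs generalizing k with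
  | nil => simp [pvUpsFrom, PySem.List.enumerate_nil]
  | cons c r ih =>
    rw [PySem.List.enumerate_cons]
    by_cases h : pvIsUp c
    · simp [pvUpsFrom, h, ih]
    · simp [pvUpsFrom, h, ih]

-- B's zip/any form equals the recursive adjacency test
theorem pvZipAnyAdj (l : List Int) :
    (l.zip l.tail).any (fun p => p.2 - p.1 == 1) = pvAnyAdj l := by
  induction l with
  | nil => rfl
  | cons a r ih =>
    cases r with
    | nil => rfl
    | cons b t =>
      simp only [List.tail_cons, List.zip_cons_cons, List.any_cons, pvAnyAdj]
      rw [← ih]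
      simp

theorem pvUpsFrom_ge (cs : List Char) (k : Int) : ∀ x ∈ pvUpsFrom k cs, k ≤ x := by
  induction cs generalizing k with
  | nil => simp [pvUpsFrom]
  | cons c r ih =>
    intro x hx
    simp only [pvUpsFrom] at hx
    split at hx
    · rcases List.mem_cons.mp hx with h | h
      · omega
      · have := ih (k + 1) x h; omega
    · have := ih (k + 1) x hx; omega

theorem pvAnyAdj_drop (j k : Int) (l : List Int) (hjk : j + 2 ≤ k) (hge : ∀ x ∈ l, k ≤ x) :
    pvAnyAdj (j :: l) = pvAnyAdj l := by
  cases l with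
  | nil => rfl
  | cons x t =>
    have hx : k ≤ x := hge x (List.mem_cons_self ..)
    simp only [pvAnyAdj]
    have : (x - j == 1) = false := by simp; omega
    rw [this, Bool.false_or]

-- adjacency on uppercase positions = A's consecutive-uppercase scan
theorem pvMain (cs : List Char) (k : Int) (pend : Option Int) (prev : Option Char)
    (hps : pend.isSome = pvPrevUp prev)
    (hp : ∀ j, pend = some j → j + 1 = k) :
    pvAnyAdj ((match pend with | some j => j :: pvUpsFrom k cs | none => pvUpsFrom k cs))
      = pvBadFrom prev cs := by
  induction cs generalizing k pend prev with
  | nil =>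
    cases pend with
    | none => rfl
    | some j => rfl
  | cons c r ih =>
    simp only [pvBadFrom]
    by_cases hup : pvIsUp c
    · simp only [pvUpsFrom, if_pos hup]
      cases pend with
      | some j =>
        have hj := hp j rfl
        have hprev : pvPrevUp prev = true := by rw [← hps]; rfl
        simp only [pvAnyAdj, hup, hprev, Bool.and_self, Bool.true_or]
        have : (k - j == 1) = true := by simp; omega
        simp [this]
      | none =>
        have hprev : pvPrevUp prev = false := by rw [← hps]; rfl
        rw [ih (k + 1) (some k) (some c) (by simp [pvPrevUp, hup]) (by intro j hj; cases hj; ring)]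
        simp [hprev]
    · simp only [pvUpsFrom, if_neg hup]
      have hbc : (pvIsUp c && pvPrevUp prev) = false := by
        rw [Bool.eq_false_iff.mpr hup]; simp
      rw [hbc, Bool.false_or]
      cases pend with
      | some j =>
        have hj := hp j rfl
        rw [pvAnyAdj_drop j (k + 1) _ (by omega) (pvUpsFrom_ge r (k + 1))]
        exact ih (k + 1) none (some c) (by simp [pvPrevUp, Bool.eq_false_iff.mpr hup]) (by intro j hj; cases hj)
      | none =>
        exact ih (k + 1) none (some c) (by simp [pvPrevUp, Bool.eq_false_iff.mpr hup]) (by intro j hj; cases hj)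

-- ===== VERDICT =====
theorem validarDesc_spec : Claim_equal_validarDesc := by
  intro s _
  unfold Spec_validarDesc validarDesc validarDesc_alt
  simp only []
  set cs := s.toList with hcs
  by_cases hlen : cs.length ≤ 60
  · rw [if_pos hlen, if_neg (by omega)]
    rw [pvLoopInv, pvEnumUps, pvZipAnyAdj]
    rw [pvMain cs 0 none none rfl (by intro j hj; cases hj)]
    simp only [zero_add, Bool.false_or]
    by_cases hb : pvBadFrom none cs = true
    · simp [hb]
    · rw [Bool.eq_false_iff.mpr hb]
      simp
  · rw [if_neg hlen, if_pos (by omega)]
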